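-- pv_equiv track=rewrite | github.com/ministryofjustice/opg-github-actions | app/python/githelper.py | find_bumps_from_commits
-- ===== SOURCE A (Python) =====
-- def find_bumps_from_commits(commits:list, default_bump:str) -> tuple:
--     """
--     Scan all fields in the commits passed looking for triggers of each type.
--     Return counter of each.
--     The count for default_bump starts at 1 instead of 0 to ensure something is
--     always increased.
--     """
--     majors=1 if default_bump == "major" else 0
--     minors=1 if default_bump == "minor" else 0
--     patches=1 if default_bump == "patch" else 0
--     for c in commits:
--         # check each field in the dict
--         for k in ['subject', 'notes', 'body']:
--             majors = majors + 1 if "#major" in c[k] else majors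
--             minors = minors + 1 if "#minor" in c[k] else minors
--             patches = patches + 1 if "#patch" in c[k] else patches
--
--     return majors, minors, patches
-- ===== SOURCE B (Python) =====
-- def count_trigger(commits, tag, seed):
--     n = seed
--     for c in commits:
--         for k in ['subject', 'notes', 'body']:
--             if tag in c[k]:
--                 n += 1
--     return n
--
--
-- def find_bumps_from_commits(commits: list, default_bump: str) -> tuple:
--     return (
--         count_trigger(commits, "#major", 1 if default_bump == "major" else 0),
--         count_trigger(commits, "#minor", 1 if default_bump == "minor" else 0),
--         count_trigger(commits, "#patch", 1 if default_bump == "patch" else 0),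
--     )
-- ===== Notes on version B (the rewrite author's own statement) =====
-- stated objective: alternative
-- what changed: Replaces A's single interleaved pass with three parallel accumulators by a helper count_trigger that makes one full separate pass over all commits and fields per trigger kind, seeded from default_bump.
import Mathlib
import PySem

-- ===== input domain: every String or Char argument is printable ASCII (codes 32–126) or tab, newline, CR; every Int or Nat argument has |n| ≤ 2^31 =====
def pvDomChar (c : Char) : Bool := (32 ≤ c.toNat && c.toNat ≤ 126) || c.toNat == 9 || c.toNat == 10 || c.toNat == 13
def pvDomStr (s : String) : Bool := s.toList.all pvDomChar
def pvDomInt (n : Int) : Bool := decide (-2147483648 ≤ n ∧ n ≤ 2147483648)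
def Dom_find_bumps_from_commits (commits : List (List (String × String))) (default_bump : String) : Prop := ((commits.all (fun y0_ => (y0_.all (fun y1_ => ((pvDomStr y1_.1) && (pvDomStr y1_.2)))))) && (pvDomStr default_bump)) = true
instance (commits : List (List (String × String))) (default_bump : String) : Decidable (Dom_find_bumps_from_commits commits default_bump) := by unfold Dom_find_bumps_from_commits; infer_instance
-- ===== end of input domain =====

-- B restructures A's single pass (three parallel accumulators) into three separate passes,
-- one per trigger kind, via a helper count_trigger; same cost, different decomposition.
-- Pre_ excludes commits missing one of the keys 'subject'/'notes'/'body', where A raises KeyError (B raises too).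

-- ===== PORT A =====
-- c[k]: dict lookup (first match on the association list); Pre_ guarantees the key is present,
-- so getD "" is never reached on admitted inputs.
def pvField (c : List (String × String)) (k : String) : String := (c.lookup k).getD ""

def find_bumps_from_commits (commits : List (List (String × String))) (default_bump : String) : Int × Int × Int :=
  let majors : Int := if default_bump = "major" then 1 else 0
  let minors : Int := if default_bump = "minor" then 1 else 0
  let patches : Int := if default_bump = "patch" then 1 else 0
  let st := commits.foldl (fun st c =>
    (["subject", "notes", "body"]).foldl (fun st k =>
      let s := pvField c k
      (if PySem.Str.isIn "#major" s then st.1 + 1 else st.1,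
       if PySem.Str.isIn "#minor" s then st.2.1 + 1 else st.2.1,
       if PySem.Str.isIn "#patch" s then st.2.2 + 1 else st.2.2)) st) (majors, minors, patches)
  st

-- ===== PORT B =====
def count_trigger (commits : List (List (String × String))) (tag : String) (seed : Int) : Int :=
  commits.foldl (fun n c =>
    (["subject", "notes", "body"]).foldl (fun n k =>
      if PySem.Str.isIn tag (pvField c k) then n + 1 else n) n) seed

def find_bumps_from_commits_alt (commits : List (List (String × String))) (default_bump : String) : Int × Int × Int :=
  (count_trigger commits "#major" (if default_bump = "major" then 1 else 0),
   count_trigger commits "#minor" (if default_bump = "minor" then 1 else 0),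
   count_trigger commits "#patch" (if default_bump = "patch" then 1 else 0))

-- ===== PRECONDITION & SPEC =====
-- Pre_ : every commit carries all three keys; on a missing key Python's c[k] raises KeyError.
def Pre_find_bumps_from_commits (commits : List (List (String × String))) (default_bump : String) : Prop :=
  ∀ c ∈ commits, ∀ k ∈ (["subject", "notes", "body"] : List String), (c.lookup k).isSome
instance (commits : List (List (String × String))) (default_bump : String) : Decidable (Pre_find_bumps_from_commits commits default_bump) := by unfold Pre_find_bumps_from_commits; infer_instance

def pvWitness_find_bumps_from_commits : (List (List (String × String))) × String :=
  ([[("subject", "#major fix"), ("notes", ""), ("body", "#patch")]], "minor")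

def Spec_find_bumps_from_commits (commits : List (List (String × String))) (default_bump : String) (out : Int × Int × Int) : Prop := out = find_bumps_from_commits_alt commits default_bump
instance (commits : List (List (String × String))) (default_bump : String) (out : Int × Int × Int) : Decidable (Spec_find_bumps_from_commits commits default_bump out) := by unfold Spec_find_bumps_from_commits; infer_instance

-- ===== CLAIM (what is proved, stated in full; the proofs are below) =====
def Claim_equal_find_bumps_from_commits : Prop := ∀ (commits : List (List (String × String))) (default_bump : String), Dom_find_bumps_from_commits commits default_bump → Pre_find_bumps_from_commits commits default_bump → Spec_find_bumps_from_commits commits default_bump (find_bumps_from_commits commits default_bump)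

-- ===== LEMMAS AND PROOFS =====

-- A's interleaved fold computes, componentwise, B's three independent folds.
theorem foldA_eq_triple (commits : List (List (String × String))) (m n p : Int) :
    commits.foldl (fun st c =>
      (["subject", "notes", "body"]).foldl (fun st k =>
        let s := pvField c k
        (if PySem.Str.isIn "#major" s then st.1 + 1 else st.1,
         if PySem.Str.isIn "#minor" s then st.2.1 + 1 else st.2.1,
         if PySem.Str.isIn "#patch" s then st.2.2 + 1 else st.2.2)) st) (m, n, p)
    = (count_trigger commits "#major" m, count_trigger commits "#minor" n,
       count_trigger commits "#patch" p) := by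
  induction commits generalizing m n p with
  | nil => rfl
  | cons c cs ih =>
    simp only [List.foldl_cons, count_trigger] at *
    exact ih _ _ _

-- ===== VERDICT (by name: the statement is the Claim_ definition above) =====
theorem find_bumps_from_commits_spec : Claim_equal_find_bumps_from_commits := by
  intro commits default_bump _ _
  unfold Spec_find_bumps_from_commits find_bumps_from_commits find_bumps_from_commits_alt
  exact foldA_eq_triple commits _ _ _
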